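-- pv_equiv track=rewrite | github.com/iitkcpslab/Opt-ITPP | Utilities/Problems_Generator/scripts/problem_generator_legacy.py | genMap
-- ===== SOURCE A (Python) =====
-- def genMap(mapsize):
--     if (mapsize // 10) % 2 == 0:
--         x =  ([ (1, 1) ] +  [ (i, i+1) for i in range(4, mapsize, 4)] + [ (mapsize, mapsize)] )
--         y = []
--         for i in range(0, mapsize, 10):
--             y.extend( [ (i+2, i+9)] * len(x) )
--         x = x * (mapsize//10)
--
--     else:
--
--         x =  [ (i, i+1) for i in range(3, mapsize, 4)]
--         y = []
--         for i in range(0, mapsize, 10):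
--             y.extend( [ (i+2, i+9)] * len(x) )
--         x = x * (mapsize//10)
--
--     tmap = [ [0] * mapsize for i in range(mapsize)]
--     for xr, yr in zip(y, x):
--         for i in range(xr[0]-1, xr[1]):
--             for j in range(yr[0]-1, yr[1]):
--                 tmap[i][j] = 1
--
--     return tmap
-- ===== SOURCE B (Python) =====
-- def genMap(mapsize):
--     nblocks = mapsize // 10
--     if nblocks % 2 == 0:
--         mask = [1 if (j == 0 or j == mapsize - 1 or (j % 4 == 3 and j + 1 < mapsize)
--                       or (j % 4 == 0 and 4 <= j < mapsize)) else 0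
--                 for j in range(mapsize)]
--     else:
--         mask = [1 if ((j % 4 == 2 and 2 <= j and j + 1 < mapsize)
--                       or (j % 4 == 3 and j < mapsize)) else 0
--                 for j in range(mapsize)]
--     return [mask[:] if (r // 10 < nblocks and 1 <= r % 10 <= 8) else [0] * mapsize
--             for r in range(mapsize)]
-- ===== Notes on version B (the rewrite author's own statement) =====
-- stated objective: faster
-- what changed: Instead of painting rectangles into a mutable grid via replicated pair-lists zipped together, B derives a closed-form arithmetic membership test (row lies in a full 10-block interior; column index is on one of the fixed mod-4 stripes or the border columns), builds the column mask once, and emits each row as a copy of that mask or a zero row.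
import Mathlib
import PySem

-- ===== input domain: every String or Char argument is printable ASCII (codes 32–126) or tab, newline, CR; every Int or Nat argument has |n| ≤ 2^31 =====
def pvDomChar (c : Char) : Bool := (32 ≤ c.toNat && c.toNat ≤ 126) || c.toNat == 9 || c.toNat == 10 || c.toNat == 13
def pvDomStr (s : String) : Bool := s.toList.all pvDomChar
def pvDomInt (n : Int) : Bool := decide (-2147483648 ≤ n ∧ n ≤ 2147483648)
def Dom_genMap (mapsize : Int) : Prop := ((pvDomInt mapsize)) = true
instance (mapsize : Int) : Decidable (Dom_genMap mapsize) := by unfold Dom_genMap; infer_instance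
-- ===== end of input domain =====

-- B replaces A's rectangle-painting over replicated zipped pair-lists by a closed-form
-- per-cell membership test: the grid is built directly as a comprehension (simpler, no mutation).

-- 'tmap[i][j] = 1': exact for the nonnegative in-range indices A's loops generate
-- (out of range Python would raise IndexError; these loops never produce such indices).
def setCell (t : List (List Int)) (i j : Int) : List (List Int) :=
  if 0 ≤ i ∧ 0 ≤ j then t.modify i.toNat (fun row => row.set j.toNat 1) else t

-- ===== PORT A =====
def genMap (mapsize : Int) : List (List Int) :=
  let x : List (Int × Int) :=
    if PySem.Int.mod (PySem.Int.floordiv mapsize 10) 2 = 0 then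
      [((1 : Int), (1 : Int))] ++ (PySem.List.pyRange 4 mapsize 4).map (fun i => (i, i + 1))
        ++ [(mapsize, mapsize)]
    else
      (PySem.List.pyRange 3 mapsize 4).map (fun i => (i, i + 1))
  let y : List (Int × Int) :=
    (PySem.List.pyRange 0 mapsize 10).foldl
      (fun acc i => acc ++ PySem.List.pyRepeat [(i + 2, i + 9)] (Int.ofNat x.length)) []
  let x2 := PySem.List.pyRepeat x (PySem.Int.floordiv mapsize 10)
  let tmap := (PySem.List.pyRange 0 mapsize 1).map (fun _ => PySem.List.pyRepeat [(0 : Int)] mapsize)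
  (y.zip x2).foldl
    (fun t p =>
      (PySem.List.pyRange (p.1.1 - 1) p.1.2 1).foldl
        (fun t i =>
          (PySem.List.pyRange (p.2.1 - 1) p.2.2 1).foldl (fun t j => setCell t i j) t)
        t)
    tmap

-- ===== PORT B =====
def genMap_alt (mapsize : Int) : List (List Int) :=
  let nblocks := PySem.Int.floordiv mapsize 10
  let mask : List Int :=
    if PySem.Int.mod nblocks 2 = 0 then
      (PySem.List.pyRange 0 mapsize 1).map (fun j =>
        if j = 0 ∨ j = mapsize - 1 ∨ (PySem.Int.mod j 4 = 3 ∧ j + 1 < mapsize)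
            ∨ (PySem.Int.mod j 4 = 0 ∧ 4 ≤ j ∧ j < mapsize) then (1 : Int) else 0)
    else
      (PySem.List.pyRange 0 mapsize 1).map (fun j =>
        if (PySem.Int.mod j 4 = 2 ∧ 2 ≤ j ∧ j + 1 < mapsize)
            ∨ (PySem.Int.mod j 4 = 3 ∧ j < mapsize) then (1 : Int) else 0)
  (PySem.List.pyRange 0 mapsize 1).map (fun r =>
    if PySem.Int.floordiv r 10 < nblocks ∧ 1 ≤ PySem.Int.mod r 10 ∧ PySem.Int.mod r 10 ≤ 8 then
      mask
    else PySem.List.pyRepeat [(0 : Int)] mapsize)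

-- ===== PRECONDITION & SPEC =====
def Spec_genMap (mapsize : Int) (out : List (List Int)) : Prop := out = genMap_alt mapsize
instance (mapsize : Int) (out : List (List Int)) : Decidable (Spec_genMap mapsize out) := by
  unfold Spec_genMap; infer_instance

-- ===== CLAIM (what is proved, stated in full; the proofs are below) =====
def Claim_equal_genMap : Prop := ∀ (mapsize : Int), Dom_genMap mapsize → Spec_genMap mapsize (genMap mapsize)

-- ===== LEMMAS AND PROOFS =====

-- A's column-pair list (the shared branch), the zero grid, and the flattened cell list A paints
def colsFor (m : Int) : List (Int × Int) :=
  if PySem.Int.mod (PySem.Int.floordiv m 10) 2 = 0 then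
    [((1 : Int), (1 : Int))] ++ (PySem.List.pyRange 4 m 4).map (fun i => (i, i + 1)) ++ [(m, m)]
  else
    (PySem.List.pyRange 3 m 4).map (fun i => (i, i + 1))

def zeroGrid (m : Int) : List (List Int) :=
  (PySem.List.pyRange 0 m 1).map (fun _ => PySem.List.pyRepeat [(0 : Int)] m)

def cells (m : Int) : List (Int × Int) :=
  (PySem.List.pyRange 0 (PySem.Int.floordiv m 10) 1).flatMap (fun k =>
    (colsFor m).flatMap (fun c =>
      (PySem.List.pyRange (10 * k + 1) (10 * k + 9) 1).flatMap (fun r =>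
        (PySem.List.pyRange (c.1 - 1) c.2 1).map (fun j => (r, j)))))

-- zipping a block of replicated row-pairs against the column list pairs every column with that row-pair
theorem zip_replicate_left {α β : Type} (a : α) (l : List β) :
    (List.replicate l.length a).zip l = l.map (fun c => (a, c)) := by
  induction l with
  | nil => rfl
  | cons b bs ih => simp [List.replicate_succ, List.zip_cons_cons, ih]

-- folding over a flatMap is the nested fold
theorem foldl_flatMap {α β γ : Type} (g : α → List β) (f : γ → β → γ) (l : List α) (init : γ) :
    (l.flatMap g).foldl f init = l.foldl (fun t x => (g x).foldl f t) init := by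
  induction l generalizing init with
  | nil => rfl
  | cons a as ih => simp [List.flatMap_cons, List.foldl_append, ih]

-- A's zip of the replicated y-list against the repeated column list is the block-by-block flatMap
theorem zip_blocks {β : Type} (cols : List β) (g : Int → β) :
    ∀ (n : Nat) (yb : List Int), n ≤ yb.length →
      ((yb.flatMap fun i => List.replicate cols.length (g i)).zip
          ((List.replicate n cols).flatten))
        = (yb.take n).flatMap (fun i => cols.map (fun c => (g i, c))) := by
  intro n
  induction n with
  | zero => intro yb _; simp
  | succ n ih =>
    intro yb hlen
    cases yb with
    | nil => simp at hlen
    | cons i yb' =>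
      simp only [List.flatMap_cons, List.replicate_succ, List.flatten_cons, List.take_succ_cons]
      rw [List.zip_append (by simp), zip_replicate_left, ih yb' (by simpa using hlen)]

-- the first mapsize//10 elements of range(0, mapsize, 10) are 10*k for k in range(mapsize//10)
theorem take_blocks (m : Int) :
    (PySem.List.pyRange 0 m 10).take (PySem.Int.floordiv m 10).toNat
      = (PySem.List.pyRange 0 (PySem.Int.floordiv m 10) 1).map (fun k => 10 * k) := by
  rw [PySem.List.pyRange_of_pos 0 m (by norm_num), PySem.List.pyRange_one,
    PySem.Int.floordiv_eq_ediv_of_pos (by norm_num : (0:Int) < 10)]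
  rw [← List.map_take, List.take_range, List.map_map]
  have hmin : min (m / 10).toNat (if (0:Int) < m then ((m - 0 + 10 - 1) / 10).toNat else 0)
      = (m / 10).toNat := by
    split_ifs with h <;> omega
  rw [hmin]
  simp [Function.comp]

-- mapsize//10 never exceeds the number of row blocks range(0, mapsize, 10) produces
theorem blocks_le (m : Int) :
    (PySem.Int.floordiv m 10).toNat ≤ (PySem.List.pyRange 0 m 10).length := by
  rw [PySem.List.pyRange_of_pos 0 m (by norm_num),
    PySem.Int.floordiv_eq_ediv_of_pos (by norm_num : (0:Int) < 10)]
  simp only [List.length_map, List.length_range]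
  split_ifs with h <;> omega

-- A's zip-and-paint fold is the fold of setCell over the flattened cell list
theorem genMap_eq_cells (m : Int) :
    genMap m = (cells m).foldl (fun t p => setCell t p.1 p.2) (zeroGrid m) := by
  have core : ∀ (cols : List (Int × Int)) (t0 : List (List Int)),
      (((PySem.List.pyRange 0 m 10).foldl
          (fun acc i => acc ++ PySem.List.pyRepeat [(i + 2, i + 9)] (Int.ofNat cols.length)) []).zip
            (PySem.List.pyRepeat cols (PySem.Int.floordiv m 10))).foldl
        (fun t p =>
          (PySem.List.pyRange (p.1.1 - 1) p.1.2 1).foldl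
            (fun t i =>
              (PySem.List.pyRange (p.2.1 - 1) p.2.2 1).foldl (fun t j => setCell t i j) t)
            t)
        t0
      = ((PySem.List.pyRange 0 (PySem.Int.floordiv m 10) 1).flatMap (fun k =>
          cols.flatMap (fun c =>
            (PySem.List.pyRange (10 * k + 1) (10 * k + 9) 1).flatMap (fun r =>
              (PySem.List.pyRange (c.1 - 1) c.2 1).map (fun j => (r, j)))))).foldl
          (fun t p => setCell t p.1 p.2) t0 := by
    intro cols t0
    have hy : ((PySem.List.pyRange 0 m 10).foldl
        (fun acc i => acc ++ PySem.List.pyRepeat [(i + 2, i + 9)] (Int.ofNat cols.length)) [])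
        = (PySem.List.pyRange 0 m 10).flatMap (fun i => List.replicate cols.length (i + 2, i + 9)) := by
      simp only [PySem.List.pyRepeat_singleton]
      rw [PySem.List.foldl_append_eq_flatMap]
      simp
    rw [hy, PySem.List.pyRepeat, zip_blocks cols (fun i => (i + 2, i + 9)) _ _ (blocks_le m),
      take_blocks]
    rw [foldl_flatMap, foldl_flatMap, List.foldl_map]
    apply PySem.List.foldl_congr_mem
    intro t k _
    rw [List.foldl_map, foldl_flatMap]
    apply PySem.List.foldl_congr_mem
    intro t' c _
    rw [foldl_flatMap]
    have h1 : 10 * k + 2 - 1 = 10 * k + 1 := by ring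
    simp only [h1]
    apply PySem.List.foldl_congr_mem
    intro t'' r _
    rw [List.foldl_map]
  unfold genMap cells zeroGrid colsFor
  by_cases hpar : PySem.Int.mod (PySem.Int.floordiv m 10) 2 = 0 <;>
    (simp only [hpar, if_true, if_false]; exact core _ _)

-- setCell preserves the grid's shape
theorem setCell_length (t : List (List Int)) (i j : Int) : (setCell t i j).length = t.length := by
  unfold setCell; split <;> simp [List.length_modify]

theorem setCell_row_length (t : List (List Int)) (i j : Int) (r : Nat) :
    ((setCell t i j).getD r []).length = (t.getD r []).length := by
  unfold setCell
  split
  · simp only [List.getD_eq_getElem?_getD, List.getElem?_modify]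
    cases t[r]? <;> simp <;> split <;> simp
  · rfl

-- what one write does to a cell read back at in-range coordinates
theorem setCell_getD (t : List (List Int)) (i j : Int) (r c : Nat)
    (hr : r < t.length) (hc : c < (t.getD r []).length) :
    ((setCell t i j).getD r []).getD c 0
      = if i = ↑r ∧ j = ↑c then 1 else (t.getD r []).getD c 0 := by
  unfold setCell
  by_cases hpos : 0 ≤ i ∧ 0 ≤ j
  · rw [if_pos hpos]
    have hlen : r < (t.modify i.toNat (fun row => row.set j.toNat 1)).length := by
      simpa [List.length_modify] using hr
    rw [List.getD_eq_getElem _ _ hlen, List.getElem_modify, List.getD_eq_getElem _ _ hr]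
    by_cases hir : i.toNat = r
    · have hi : i = ↑r := by omega
      rw [if_pos hir]
      by_cases hjc : j.toNat = c
      · have hj : j = ↑c := by omega
        have hclen : j.toNat < t[r].length := by
          rw [hjc]; rwa [List.getD_eq_getElem _ _ hr] at hc
        rw [List.getD_eq_getElem?_getD, ← hjc, List.getElem?_set_self hclen]
        simp [hi, hj]
      · rw [List.getD_eq_getElem?_getD, List.getElem?_set_ne hjc, ← List.getD_eq_getElem?_getD]
        have hj : ¬ j = ↑c := by omega
        rw [if_neg (by rintro ⟨_, h2⟩; exact hj h2)]
    · rw [if_neg hir]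
      have hi : ¬ i = ↑r := by omega
      rw [if_neg (by rintro ⟨h1, _⟩; exact hi h1)]
  · rw [if_neg hpos]
    have hni : ¬ (i = ↑r ∧ j = ↑c) := by
      rintro ⟨rfl, rfl⟩; exact hpos ⟨Int.natCast_nonneg r, Int.natCast_nonneg c⟩
    rw [if_neg hni, List.getD_eq_getElem _ _ hr]

-- the fold of writes preserves the shape …
theorem foldl_setCell_length (L : List (Int × Int)) (t : List (List Int)) :
    (L.foldl (fun t p => setCell t p.1 p.2) t).length = t.length := by
  induction L generalizing t with
  | nil => rfl
  | cons p L ih => simp only [List.foldl_cons]; rw [ih, setCell_length]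

theorem foldl_setCell_row_length (L : List (Int × Int)) (t : List (List Int)) (r : Nat) :
    ((L.foldl (fun t p => setCell t p.1 p.2) t).getD r []).length = (t.getD r []).length := by
  induction L generalizing t with
  | nil => rfl
  | cons p L ih => simp only [List.foldl_cons]; rw [ih, setCell_row_length]

-- … and a cell of the painted grid is 1 exactly when some listed write targets it
theorem foldl_setCell_getD (L : List (Int × Int)) (t : List (List Int)) (r c : Nat)
    (hr : r < t.length) (hc : c < (t.getD r []).length) :
    ((L.foldl (fun t p => setCell t p.1 p.2) t).getD r []).getD c 0
      = if (∃ p ∈ L, p.1 = ↑r ∧ p.2 = ↑c) then 1 else (t.getD r []).getD c 0 := by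
  induction L generalizing t with
  | nil => simp
  | cons p L ih =>
    simp only [List.foldl_cons]
    rw [ih _ (by rw [setCell_length]; exact hr) (by rw [setCell_row_length]; exact hc),
      setCell_getD t p.1 p.2 r c hr hc]
    by_cases h1 : ∃ q ∈ L, q.1 = (r : Int) ∧ q.2 = (c : Int)
    · simp [h1]
    · by_cases h2 : p.1 = (r : Int) ∧ p.2 = (c : Int)
      · simp [h1, h2]
      · simp only [if_neg h1, if_neg h2]
        rw [if_neg]
        rintro ⟨q, hq, hq2⟩
        rcases List.mem_cons.mp hq with rfl | hmem
        · exact h2 hq2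
        · exact h1 ⟨q, hmem, hq2⟩

-- membership in the flattened cell list splits into a row condition and a column condition
theorem mem_cells_iff (m r c : Int) :
    (∃ p ∈ cells m, p.1 = r ∧ p.2 = c)
      ↔ ((∃ k, 0 ≤ k ∧ k < PySem.Int.floordiv m 10 ∧ 10 * k + 1 ≤ r ∧ r < 10 * k + 9)
          ∧ (∃ col ∈ colsFor m, col.1 - 1 ≤ c ∧ c < col.2)) := by
  unfold cells
  constructor
  · rintro ⟨p, hp, h1, h2⟩
    simp only [List.mem_flatMap, List.mem_map, PySem.List.mem_pyRange_one] at hp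
    obtain ⟨k, ⟨hk0, hk1⟩, col, hcol, rr, ⟨hr0, hr1⟩, jj, ⟨hj0, hj1⟩, hpe⟩ := hp
    rw [← hpe] at h1 h2
    simp only at h1 h2
    subst h1; subst h2
    exact ⟨⟨k, hk0, hk1, hr0, hr1⟩, ⟨col, hcol, hj0, hj1⟩⟩
  · rintro ⟨⟨k, hk0, hk1, hr0, hr1⟩, ⟨col, hcol, hj0, hj1⟩⟩
    refine ⟨(r, c), ?_, rfl, rfl⟩
    simp only [List.mem_flatMap, List.mem_map, PySem.List.mem_pyRange_one]
    exact ⟨k, ⟨hk0, hk1⟩, col, hcol, r, ⟨hr0, hr1⟩, c, ⟨hj0, hj1⟩, rfl⟩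

-- the row condition is the closed-form block test
theorem row_iff (nb r : Int) (hr : 0 ≤ r) :
    (∃ k, 0 ≤ k ∧ k < nb ∧ 10 * k + 1 ≤ r ∧ r < 10 * k + 9)
      ↔ (PySem.Int.floordiv r 10 < nb ∧ 1 ≤ PySem.Int.mod r 10 ∧ PySem.Int.mod r 10 ≤ 8) := by
  rw [PySem.Int.floordiv_eq_ediv_of_pos (by norm_num : (0:Int) < 10),
    PySem.Int.mod_eq_emod_of_pos (by norm_num : (0:Int) < 10)]
  constructor
  · rintro ⟨k, h0, h1, h2, h3⟩; omega
  · intro h; exact ⟨r / 10, by omega, by omega, by omega, by omega⟩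

-- the even-branch column pairs cover exactly the closed-form columns
theorem cols_even_iff (m c : Int) (h0 : 0 ≤ c) :
    (∃ col ∈ ([((1:Int), (1:Int))] ++ (PySem.List.pyRange 4 m 4).map (fun i => (i, i + 1))
        ++ [(m, m)]), col.1 - 1 ≤ c ∧ c < col.2)
      ↔ (c = 0 ∨ c = m - 1 ∨ (PySem.Int.mod c 4 = 3 ∧ c + 1 < m)
          ∨ (PySem.Int.mod c 4 = 0 ∧ 4 ≤ c ∧ c < m)) := by
  rw [PySem.Int.mod_eq_emod_of_pos (by norm_num : (0:Int) < 4)]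
  constructor
  · rintro ⟨col, hcol, hc1, hc2⟩
    simp only [List.mem_append, List.mem_singleton, List.mem_map,
      PySem.List.mem_pyRange_iff_of_pos (by norm_num : (0:Int) < 4)] at hcol
    rcases hcol with (rfl | ⟨i, ⟨hi4, him, hdvd⟩, rfl⟩) | rfl
    · simp only at hc1 hc2; omega
    · simp only at hc1 hc2; omega
    · simp only at hc1 hc2; omega
  · intro h
    rcases h with rfl | rfl | ⟨hm, hlt⟩ | ⟨hm, h4, hlt⟩
    · exact ⟨(1, 1), by simp, by norm_num⟩
    · exact ⟨(m, m), by simp, by omega⟩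
    · refine ⟨(c + 1, c + 2), ?_, by omega⟩
      simp only [List.mem_append, List.mem_singleton, List.mem_map,
        PySem.List.mem_pyRange_iff_of_pos (by norm_num : (0:Int) < 4)]
      refine Or.inl (Or.inr ⟨c + 1, ⟨by omega, by omega, by omega⟩, by ring_nf⟩)
    · refine ⟨(c, c + 1), ?_, by omega⟩
      simp only [List.mem_append, List.mem_singleton, List.mem_map,
        PySem.List.mem_pyRange_iff_of_pos (by norm_num : (0:Int) < 4)]
      exact Or.inl (Or.inr ⟨c, ⟨by omega, by omega, by omega⟩, rfl⟩)

-- the odd-branch column pairs cover exactly the closed-form columns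
theorem cols_odd_iff (m c : Int) (h0 : 0 ≤ c) :
    (∃ col ∈ (PySem.List.pyRange 3 m 4).map (fun i => (i, i + 1)), col.1 - 1 ≤ c ∧ c < col.2)
      ↔ ((PySem.Int.mod c 4 = 2 ∧ 2 ≤ c ∧ c + 1 < m) ∨ (PySem.Int.mod c 4 = 3 ∧ c < m)) := by
  rw [PySem.Int.mod_eq_emod_of_pos (by norm_num : (0:Int) < 4)]
  constructor
  · rintro ⟨col, hcol, hc1, hc2⟩
    simp only [List.mem_map, PySem.List.mem_pyRange_iff_of_pos (by norm_num : (0:Int) < 4)] at hcol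
    obtain ⟨i, ⟨hi3, him, hdvd⟩, rfl⟩ := hcol
    simp only at hc1 hc2; omega
  · intro h
    rcases h with ⟨hm, h2, hlt⟩ | ⟨hm, hlt⟩
    · refine ⟨(c + 1, c + 2), ?_, by omega⟩
      simp only [List.mem_map, PySem.List.mem_pyRange_iff_of_pos (by norm_num : (0:Int) < 4)]
      exact ⟨c + 1, ⟨by omega, by omega, by omega⟩, by ring_nf⟩
    · refine ⟨(c, c + 1), ?_, by omega⟩
      simp only [List.mem_map, PySem.List.mem_pyRange_iff_of_pos (by norm_num : (0:Int) < 4)]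
      exact ⟨c, ⟨by omega, by omega, by omega⟩, rfl⟩

-- the zero grid's shape and contents
theorem zeroGrid_length (m : Int) : (zeroGrid m).length = m.toNat := by
  unfold zeroGrid
  rw [List.length_map, PySem.List.pyRange_one, List.length_map, List.length_range]
  omega

theorem zeroGrid_getD (m : Int) (r : Nat) (hr : r < (zeroGrid m).length) :
    (zeroGrid m).getD r [] = List.replicate m.toNat 0 := by
  unfold zeroGrid at *
  rw [List.getD_eq_getElem _ _ hr]
  simp [PySem.List.pyRepeat_singleton]

-- extensionality for grids through default-valued reads
theorem grid_ext (t1 t2 : List (List Int)) (h : t1.length = t2.length)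
    (hrow : ∀ r, r < t1.length → (t1.getD r []).length = (t2.getD r []).length)
    (hcell : ∀ r, r < t1.length → ∀ c, c < (t1.getD r []).length →
      (t1.getD r []).getD c 0 = (t2.getD r []).getD c 0) : t1 = t2 := by
  apply List.ext_getElem h
  intro r h1 h2
  apply List.ext_getElem
  · have := hrow r h1
    rwa [List.getD_eq_getElem _ _ h1, List.getD_eq_getElem _ _ h2] at this
  · intro c hc1 hc2
    have := hcell r h1 c (by rwa [List.getD_eq_getElem _ _ h1])
    rwa [List.getD_eq_getElem _ _ h1, List.getD_eq_getElem _ _ h2,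
      List.getD_eq_getElem _ _ hc1, List.getD_eq_getElem _ _ hc2] at this

-- painting the listed cells on the zero grid is the comprehension over any equivalent cell test
theorem paint_eq_grid (m : Int) (hm : 0 < m) (P : Int → Int → Prop)
    [inst : ∀ r c, Decidable (P r c)]
    (hP : ∀ r c : Int, 0 ≤ r → r < m → 0 ≤ c → c < m →
        ((∃ p ∈ cells m, p.1 = r ∧ p.2 = c) ↔ P r c)) :
    (cells m).foldl (fun t p => setCell t p.1 p.2) (zeroGrid m)
      = (PySem.List.pyRange 0 m 1).map (fun r =>
          (PySem.List.pyRange 0 m 1).map (fun c => if P r c then (1 : Int) else 0)) := by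
  obtain ⟨n, rfl⟩ : ∃ n : Nat, m = ↑n := ⟨m.toNat, by omega⟩
  simp only [PySem.List.pyRange_zero_natCast, List.map_map]
  have htn : ((n : Int)).toNat = n := by omega
  apply grid_ext
  · rw [foldl_setCell_length, zeroGrid_length, htn]; simp
  · intro r hr
    rw [foldl_setCell_length, zeroGrid_length, htn] at hr
    rw [foldl_setCell_row_length, zeroGrid_getD _ r (by rw [zeroGrid_length, htn]; exact hr),
      PySem.List.getD_map_range _ _ _ _ hr]
    simp [htn]
  · intro r hr c hc
    rw [foldl_setCell_length, zeroGrid_length, htn] at hr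
    rw [foldl_setCell_row_length, zeroGrid_getD _ r (by rw [zeroGrid_length, htn]; exact hr),
      List.length_replicate, htn] at hc
    rw [foldl_setCell_getD _ _ r c (by rw [zeroGrid_length, htn]; exact hr)
        (by rw [zeroGrid_getD _ r (by rw [zeroGrid_length, htn]; exact hr)]; simp [htn, hc]),
      zeroGrid_getD _ r (by rw [zeroGrid_length, htn]; exact hr),
      PySem.List.getD_map_range _ _ _ _ hr]
    simp only [Function.comp_apply]
    rw [PySem.List.getD_map_range _ _ _ _ hc]
    simp only [Function.comp_apply]
    have hiff := hP ↑r ↑c (by omega) (by exact_mod_cast hr) (by omega) (by exact_mod_cast hc)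
    by_cases hpc : P ↑r ↑c
    · rw [if_pos (hiff.mpr hpc), if_pos hpc]
    · rw [if_neg (fun hex => hpc (hiff.mp hex)), if_neg hpc]
      simp

-- a grid of copied mask rows and fresh zero rows is the nested per-cell comprehension
theorem alt_rows (m : Int) (rowP : Int → Prop) [DecidablePred rowP]
    (colP : Int → Prop) [DecidablePred colP] :
    (PySem.List.pyRange 0 m 1).map (fun r =>
        if rowP r then (PySem.List.pyRange 0 m 1).map (fun c => if colP c then (1 : Int) else 0)
        else PySem.List.pyRepeat [(0 : Int)] m)
      = (PySem.List.pyRange 0 m 1).map (fun r =>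
          (PySem.List.pyRange 0 m 1).map (fun c => if rowP r ∧ colP c then (1 : Int) else 0)) := by
  apply List.map_congr_left
  intro r _
  by_cases h : rowP r
  · rw [if_pos h]
    apply List.map_congr_left
    intro c _
    by_cases hc : colP c <;> simp [h, hc]
  · rw [if_neg h]
    simp only [h, false_and, if_false]
    rw [PySem.List.pyRepeat_singleton, List.map_const', PySem.List.pyRange_one]
    simp only [List.length_map, List.length_range]
    congr 1
    omega

-- ===== VERDICT (by name: the statement is the Claim_ definition above) =====
theorem genMap_spec : Claim_equal_genMap := by
  intro m _
  unfold Spec_genMap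
  by_cases hm : 0 < m
  · rw [genMap_eq_cells]
    by_cases hpar : PySem.Int.mod (PySem.Int.floordiv m 10) 2 = 0
    · have hcols : colsFor m = [((1:Int), (1:Int))]
          ++ (PySem.List.pyRange 4 m 4).map (fun i => (i, i + 1)) ++ [(m, m)] := by
        unfold colsFor; rw [if_pos hpar]
      rw [paint_eq_grid m hm
        (fun r c => (PySem.Int.floordiv r 10 < PySem.Int.floordiv m 10 ∧
            1 ≤ PySem.Int.mod r 10 ∧ PySem.Int.mod r 10 ≤ 8) ∧
          (c = 0 ∨ c = m - 1 ∨ (PySem.Int.mod c 4 = 3 ∧ c + 1 < m)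
            ∨ (PySem.Int.mod c 4 = 0 ∧ 4 ≤ c ∧ c < m)))]
      · have hsel : (if PySem.Int.mod (PySem.Int.floordiv m 10) 2 = 0 then
            (PySem.List.pyRange 0 m 1).map (fun j =>
              if j = 0 ∨ j = m - 1 ∨ (PySem.Int.mod j 4 = 3 ∧ j + 1 < m)
                  ∨ (PySem.Int.mod j 4 = 0 ∧ 4 ≤ j ∧ j < m) then (1 : Int) else 0)
          else
            (PySem.List.pyRange 0 m 1).map (fun j =>
              if (PySem.Int.mod j 4 = 2 ∧ 2 ≤ j ∧ j + 1 < m)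
                  ∨ (PySem.Int.mod j 4 = 3 ∧ j < m) then (1 : Int) else 0))
            = (PySem.List.pyRange 0 m 1).map (fun j =>
              if j = 0 ∨ j = m - 1 ∨ (PySem.Int.mod j 4 = 3 ∧ j + 1 < m)
                  ∨ (PySem.Int.mod j 4 = 0 ∧ 4 ≤ j ∧ j < m) then (1 : Int) else 0) :=
          if_pos hpar
        simp only [genMap_alt, hsel]
        rw [alt_rows]
      · intro r c hr0 hrm hc0 hcm
        rw [mem_cells_iff]
        exact and_congr (row_iff _ _ hr0) (by rw [hcols]; exact cols_even_iff m c hc0)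
    · have hcols : colsFor m = (PySem.List.pyRange 3 m 4).map (fun i => (i, i + 1)) := by
        unfold colsFor; rw [if_neg hpar]
      rw [paint_eq_grid m hm
        (fun r c => (PySem.Int.floordiv r 10 < PySem.Int.floordiv m 10 ∧
            1 ≤ PySem.Int.mod r 10 ∧ PySem.Int.mod r 10 ≤ 8) ∧
          ((PySem.Int.mod c 4 = 2 ∧ 2 ≤ c ∧ c + 1 < m)
            ∨ (PySem.Int.mod c 4 = 3 ∧ c < m)))]
      · have hsel : (if PySem.Int.mod (PySem.Int.floordiv m 10) 2 = 0 then
            (PySem.List.pyRange 0 m 1).map (fun j =>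
              if j = 0 ∨ j = m - 1 ∨ (PySem.Int.mod j 4 = 3 ∧ j + 1 < m)
                  ∨ (PySem.Int.mod j 4 = 0 ∧ 4 ≤ j ∧ j < m) then (1 : Int) else 0)
          else
            (PySem.List.pyRange 0 m 1).map (fun j =>
              if (PySem.Int.mod j 4 = 2 ∧ 2 ≤ j ∧ j + 1 < m)
                  ∨ (PySem.Int.mod j 4 = 3 ∧ j < m) then (1 : Int) else 0))
            = (PySem.List.pyRange 0 m 1).map (fun j =>
              if (PySem.Int.mod j 4 = 2 ∧ 2 ≤ j ∧ j + 1 < m)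
                  ∨ (PySem.Int.mod j 4 = 3 ∧ j < m) then (1 : Int) else 0) :=
          if_neg hpar
        simp only [genMap_alt, hsel]
        rw [alt_rows]
      · intro r c hr0 hrm hc0 hcm
        rw [mem_cells_iff]
        exact and_congr (row_iff _ _ hr0) (by rw [hcols]; exact cols_odd_iff m c hc0)
  · have h1 : m.toNat = 0 := by omega
    have h2 : (m / 10).toNat = 0 := by omega
    rw [genMap_eq_cells]
    simp [cells, zeroGrid, genMap_alt, PySem.List.pyRange_one, h1, h2]
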